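-- pv_equiv track=rewrite | github.com/Bluesy1/opb-utils | utils.py | remove_unmatched_closing
-- ===== SOURCE A (Python) =====
-- def remove_unmatched_closing(string: str):
--     stack = []
--     for i, c in enumerate(string):
--         if c == '{':
--             stack.append(i)
--         elif c == '}':
--             if len(stack) == 0:
--                 return string[:i]
--             stack.pop()
--     return string
-- ===== SOURCE B (Python) =====
-- def _match(string, i):
--     # cursor just past an opening '{'; return the index just past its matching '}',
--     # or len(string) if it never closes
--     n = len(string)
--     while i < n:
--         c = string[i]
--         if c == '}':
--             return i + 1
--         if c == '{':
--             i = _match(string, i + 1)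
--         else:
--             i += 1
--     return n
--
--
-- def remove_unmatched_closing(string: str):
--     i, n = 0, len(string)
--     while i < n:
--         c = string[i]
--         if c == '}':
--             return string[:i]
--         if c == '{':
--             i = _match(string, i + 1)
--         else:
--             i += 1
--     return string
-- ===== Notes on version B (the rewrite author's own statement) =====
-- stated objective: alternative
-- what changed: Replaces the stack-based single scan with a recursive-descent parser: an outer cursor loop that, on '{', calls a recursive matcher that skips past the whole matched group (recursion on brace nesting), cutting at the first top-level '}'.
import Mathlib
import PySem

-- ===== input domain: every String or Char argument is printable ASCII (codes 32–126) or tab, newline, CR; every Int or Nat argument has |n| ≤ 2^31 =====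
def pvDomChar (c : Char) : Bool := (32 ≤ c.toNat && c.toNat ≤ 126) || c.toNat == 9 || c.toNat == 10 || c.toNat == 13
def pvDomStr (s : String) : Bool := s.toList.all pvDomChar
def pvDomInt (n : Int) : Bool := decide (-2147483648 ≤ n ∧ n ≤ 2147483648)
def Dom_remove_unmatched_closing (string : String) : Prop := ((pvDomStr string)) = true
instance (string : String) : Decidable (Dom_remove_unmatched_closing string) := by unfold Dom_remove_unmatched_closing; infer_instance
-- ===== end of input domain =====

-- B replaces A's index-stack scan by a recursive-descent parser: an outer cursor loop that, on '{', calls a recursive matcher skipping past the whole matched group (alternative decomposition, same cost).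


-- ===== PORT A =====
-- A's loop: walk the characters with an index stack; a '}' on an empty stack yields the cut index.
def aLoop : List Char → Nat → List Int → Option Nat
  | [], _, _ => none
  | c :: rest, i, stack =>
    if c = '{' then aLoop rest (i + 1) ((i : Int) :: stack)
    else if c = '}' then
      if stack.length = 0 then some i else aLoop rest (i + 1) stack.tail
    else aLoop rest (i + 1) stack

def remove_unmatched_closing (string : String) : String :=
  match aLoop string.toList 0 [] with
  | some i => String.ofList (string.toList.take i)   -- string[:i], i ≥ 0
  | none => string

-- ===== PORT B =====
-- Source B's _match: cursor just past an opening '{'; returns the index just past its matching '}',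
-- or s.length if it never closes. The while loop becomes fuel recursion (fuel only makes it total).
def bMatch (s : List Char) : Nat → Nat → Nat
  | 0, _ => s.length
  | fuel + 1, i =>
    if h : i < s.length then
      if s[i] = '}' then i + 1
      else if s[i] = '{' then bMatch s fuel (bMatch s fuel (i + 1))
      else bMatch s fuel (i + 1)
    else s.length

-- Source B's outer loop: some t = "return string[:t]", none = "return string".
def bTopLoop (s : List Char) : Nat → Nat → Option Nat
  | 0, _ => none
  | fuel + 1, i =>
    if h : i < s.length then
      if s[i] = '}' then some i
      else if s[i] = '{' then bTopLoop s fuel (bMatch s fuel (i + 1))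
      else bTopLoop s fuel (i + 1)
    else none

def remove_unmatched_closing_alt (string : String) : String :=
  match bTopLoop string.toList (string.toList.length + 1) 0 with
  | some t => String.ofList (string.toList.take t)
  | none => string

-- ===== PRECONDITION & SPEC =====
def Spec_remove_unmatched_closing (string : String) (out : String) : Prop := out = remove_unmatched_closing_alt string
instance (string : String) (out : String) : Decidable (Spec_remove_unmatched_closing string out) := by unfold Spec_remove_unmatched_closing; infer_instance

-- ===== CLAIM (what is proved, stated in full; the proofs are below) =====
def Claim_equal_remove_unmatched_closing : Prop := ∀ (string : String), Dom_remove_unmatched_closing string → Spec_remove_unmatched_closing string (remove_unmatched_closing string)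

-- ===== LEMMAS AND PROOFS =====

-- bMatch advances the cursor past one matched group, and A's run over that region just pops one stack entry.
theorem bMatch_spec (s : List Char) : ∀ (fuel i : Nat), i ≤ s.length → s.length + 1 ≤ fuel + i →
    i ≤ bMatch s fuel i ∧ bMatch s fuel i ≤ s.length ∧
    ∀ (x : Int) (stack : List Int),
      aLoop (s.drop i) i (x :: stack) = aLoop (s.drop (bMatch s fuel i)) (bMatch s fuel i) stack := by
  intro fuel
  induction fuel with
  | zero => intro i h1 h2; omega
  | succ fuel ih =>
    intro i h1 h2
    by_cases h : i < s.length
    · have hdrop : s.drop i = s[i] :: s.drop (i + 1) := List.drop_eq_getElem_cons h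
      by_cases hc : s[i] = '}'
      · have hb : bMatch s (fuel + 1) i = i + 1 := by simp [bMatch, h, hc]
        rw [hb]
        refine ⟨by omega, by omega, ?_⟩
        intro x stack
        rw [hdrop]
        simp [aLoop, hc]
      · by_cases ho : s[i] = '{'
        · obtain ⟨hj1a, hj1b, hj1c⟩ := ih (i + 1) (by omega) (by omega)
          obtain ⟨hj2a, hj2b, hj2c⟩ := ih (bMatch s fuel (i + 1)) hj1b (by omega)
          have hb : bMatch s (fuel + 1) i = bMatch s fuel (bMatch s fuel (i + 1)) := by
            simp [bMatch, h, ho]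
          rw [hb]
          refine ⟨by omega, by omega, ?_⟩
          intro x stack
          rw [hdrop]
          simp only [aLoop, ho]
          rw [hj1c (i : Int) (x :: stack), hj2c x stack]
          simp
        · obtain ⟨hj1a, hj1b, hj1c⟩ := ih (i + 1) (by omega) (by omega)
          have hb : bMatch s (fuel + 1) i = bMatch s fuel (i + 1) := by
            simp [bMatch, h, hc, ho]
          rw [hb]
          refine ⟨by omega, by omega, ?_⟩
          intro x stack
          rw [hdrop]
          simp only [aLoop, if_neg hc, if_neg ho]
          exact hj1c x stack
    · have hi : i = s.length := by omega
      have hb : bMatch s (fuel + 1) i = s.length := by simp [bMatch, h]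
      rw [hb]
      refine ⟨by omega, by omega, ?_⟩
      intro x stack
      simp [hi, List.drop_length, aLoop]

-- A's run with an empty stack equals B's outer loop.
theorem bTop_spec (s : List Char) : ∀ (fuel i : Nat), i ≤ s.length → s.length + 1 ≤ fuel + i →
    aLoop (s.drop i) i [] = bTopLoop s fuel i := by
  intro fuel
  induction fuel with
  | zero => intro i h1 h2; omega
  | succ fuel ih =>
    intro i h1 h2
    by_cases h : i < s.length
    · have hdrop : s.drop i = s[i] :: s.drop (i + 1) := List.drop_eq_getElem_cons h
      by_cases hc : s[i] = '}'
      · have hb : bTopLoop s (fuel + 1) i = some i := by simp [bTopLoop, h, hc]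
        rw [hb, hdrop]
        simp [aLoop, hc]
      · by_cases ho : s[i] = '{'
        · obtain ⟨hj1a, hj1b, hj1c⟩ := bMatch_spec s fuel (i + 1) (by omega) (by omega)
          have hb : bTopLoop s (fuel + 1) i = bTopLoop s fuel (bMatch s fuel (i + 1)) := by
            simp [bTopLoop, h, ho]
          rw [hb, hdrop]
          simp only [aLoop, ho]
          rw [hj1c (i : Int) [], ih (bMatch s fuel (i + 1)) hj1b (by omega)]
          simp
        · have hb : bTopLoop s (fuel + 1) i = bTopLoop s fuel (i + 1) := by
            simp [bTopLoop, h, hc, ho]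
          rw [hb, hdrop]
          simp only [aLoop, if_neg hc, if_neg ho]
          exact ih (i + 1) (by omega) (by omega)
    · have hi : i = s.length := by omega
      have hb : bTopLoop s (fuel + 1) i = none := by simp [bTopLoop, h]
      rw [hb, hi, List.drop_length]
      simp [aLoop]

-- ===== VERDICT (by name: the statement is the Claim_ definition above) =====
theorem remove_unmatched_closing_spec : Claim_equal_remove_unmatched_closing := by
  intro s _
  unfold Spec_remove_unmatched_closing remove_unmatched_closing remove_unmatched_closing_alt
  have h := bTop_spec s.toList (s.toList.length + 1) 0 (by omega) (by omega)
  simp only [List.drop_zero] at h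
  rw [h]
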